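-- pv_equiv track=rewrite | github.com/marteber/miRNexpander | miRNexpander/DatabaseTools/SpeciesChecker.py | get_species_id
-- ===== SOURCE A (Python) =====
-- Species_Dict = {  # one of the list elements will constitute the canonical name that will be returned by get_canonical_name ( can be changed, see below )
--     "hsa" : [ 9606, 'hsa', 'human', 'homo sapiens', 'h. sapiens', 'homo' ],
--     "mmu" : [ 10090, 'mmu', 'mouse', 'mus musculus', 'm. musculus', 'mus', 'murine' ],
--     "rno" : [ 10116, 'rno', 'rat', 'rattus norvegicus', 'r. norvegicus', 'rattus' ],
--     "dme" : [ 7227, 'dme', 'fruitfly', 'drosophila melanogaster', 'd. melanogaster', 'drosophila' ],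
--     "gga" : [ 9031, 'gga', 'chicken', 'gallus gallus', 'g. gallus', 'gallus', 'chick' ],
--     "dre" : [ 7955, 'dre', 'zebrafish', 'danio rerio', 'd. rerio', 'danio', 'brachydanio rerio' ],
--     "cel" : [ 6239, 'cel', 'roundworm', 'caenorhabditis elegans', 'c. elegans', 'caenorhabditis' ],
--     "oar" : [ 9940, 'oar', 'sheep', 'ovis aries', 'o. aries', 'ovis' ],
--     "ocu" : [ 9986, 'ocu', 'rabbit', 'oryctolagos caniculus', 'o. caniculus', 'oryctolagos' ],
--     "bta" : [ 9913, 'bta', 'cattle', 'bos taurus', 'b. taurus', 'bos', 'bos primigenius', 'bos primigenius taurus' ],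
--     "osa" : [ 4530, 'osa', 'asian rice', 'oryza sativa', 'o. sativa', 'oryza', 'rice' ],
--     "ogl" : [ 4538, 'ogl', 'african rice', 'oryza glaberrima', 'o. glaberrima' ],
--     "ath" : [ 3702, 'ath', 'thale cress', 'arabidopsis thaliana', 'a. thaliana', 'arabidopsis', 'mouse-ear cress' ]
-- # consider adding pig/swine, horse, dog, cat...
-- }
--
-- def get_species_id( species ):
--     """return the GenBank Identifier for some common species"""
--
--     species = species.strip( ).lower( )
--     result = 1  # (non-sensical) fail-safe if there is no match in the loop
--     for species_key in Species_Dict: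
--         if species in Species_Dict[ species_key ]:
--             result = Species_Dict[ species_key ][ 0 ]  # change assignment if you want to return another list element
--             break
--     return result
-- ===== SOURCE B (Python) =====
-- # Flat precomputed alias -> GenBank id table; one dict lookup per call.
-- _ALIAS_ID = {
--     'hsa': 9606,
--     'human': 9606,
--     'homo sapiens': 9606,
--     'h. sapiens': 9606,
--     'homo': 9606,
--     'mmu': 10090,
--     'mouse': 10090,
--     'mus musculus': 10090,
--     'm. musculus': 10090,
--     'mus': 10090,
--     'murine': 10090,
--     'rno': 10116,
--     'rat': 10116,
--     'rattus norvegicus': 10116,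
--     'r. norvegicus': 10116,
--     'rattus': 10116,
--     'dme': 7227,
--     'fruitfly': 7227,
--     'drosophila melanogaster': 7227,
--     'd. melanogaster': 7227,
--     'drosophila': 7227,
--     'gga': 9031,
--     'chicken': 9031,
--     'gallus gallus': 9031,
--     'g. gallus': 9031,
--     'gallus': 9031,
--     'chick': 9031,
--     'dre': 7955,
--     'zebrafish': 7955,
--     'danio rerio': 7955,
--     'd. rerio': 7955,
--     'danio': 7955,
--     'brachydanio rerio': 7955,
--     'cel': 6239,
--     'roundworm': 6239,
--     'caenorhabditis elegans': 6239,
--     'c. elegans': 6239,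
--     'caenorhabditis': 6239,
--     'oar': 9940,
--     'sheep': 9940,
--     'ovis aries': 9940,
--     'o. aries': 9940,
--     'ovis': 9940,
--     'ocu': 9986,
--     'rabbit': 9986,
--     'oryctolagos caniculus': 9986,
--     'o. caniculus': 9986,
--     'oryctolagos': 9986,
--     'bta': 9913,
--     'cattle': 9913,
--     'bos taurus': 9913,
--     'b. taurus': 9913,
--     'bos': 9913,
--     'bos primigenius': 9913,
--     'bos primigenius taurus': 9913,
--     'osa': 4530,
--     'asian rice': 4530,
--     'oryza sativa': 4530,
--     'o. sativa': 4530,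
--     'oryza': 4530,
--     'rice': 4530,
--     'ogl': 4538,
--     'african rice': 4538,
--     'oryza glaberrima': 4538,
--     'o. glaberrima': 4538,
--     'ath': 3702,
--     'thale cress': 3702,
--     'arabidopsis thaliana': 3702,
--     'a. thaliana': 3702,
--     'arabidopsis': 3702,
--     'mouse-ear cress': 3702,
-- }
--
-- def get_species_id(species):
--     """return the GenBank Identifier for some common species"""
--     return _ALIAS_ID.get(species.strip().lower(), 1)
-- ===== Notes on version B (the rewrite author's own statement) =====
-- stated objective: idiomatic
-- what changed: A's per-call loop over the species dict with an inner list-membership scan is replaced by a flat precomputed alias-to-id dictionary (no duplicate aliases exist, so one built literal table is exact), making each call a single dict lookup with default 1.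
import Mathlib
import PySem

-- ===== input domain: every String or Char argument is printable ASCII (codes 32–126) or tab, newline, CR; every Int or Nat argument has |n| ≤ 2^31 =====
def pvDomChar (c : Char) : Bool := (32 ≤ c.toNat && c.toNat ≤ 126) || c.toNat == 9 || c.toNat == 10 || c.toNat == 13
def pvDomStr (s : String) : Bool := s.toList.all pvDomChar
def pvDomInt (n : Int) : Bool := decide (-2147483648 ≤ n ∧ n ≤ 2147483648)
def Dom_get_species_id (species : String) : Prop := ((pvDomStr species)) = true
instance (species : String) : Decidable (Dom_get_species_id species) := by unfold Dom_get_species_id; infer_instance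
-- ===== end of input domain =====

-- B replaces A's per-call loop + membership scan with a flat precomputed alias→id
-- dictionary (single lookup, default 1); the alias lists contain no duplicates, so
-- the flat table is exact.

-- ===== PORT A =====
-- Species_Dict: each value is (id, aliases); Python's `species in [id, 'a', …]` can only
-- match the string aliases (a str never equals the leading int), so the membership test
-- is ported exactly as membership in the alias list.
def speciesTable : List (Int × List String) :=
  [ (9606, ["hsa", "human", "homo sapiens", "h. sapiens", "homo"]),
    (10090, ["mmu", "mouse", "mus musculus", "m. musculus", "mus", "murine"]),
    (10116, ["rno", "rat", "rattus norvegicus", "r. norvegicus", "rattus"]),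
    (7227, ["dme", "fruitfly", "drosophila melanogaster", "d. melanogaster", "drosophila"]),
    (9031, ["gga", "chicken", "gallus gallus", "g. gallus", "gallus", "chick"]),
    (7955, ["dre", "zebrafish", "danio rerio", "d. rerio", "danio", "brachydanio rerio"]),
    (6239, ["cel", "roundworm", "caenorhabditis elegans", "c. elegans", "caenorhabditis"]),
    (9940, ["oar", "sheep", "ovis aries", "o. aries", "ovis"]),
    (9986, ["ocu", "rabbit", "oryctolagos caniculus", "o. caniculus", "oryctolagos"]),
    (9913, ["bta", "cattle", "bos taurus", "b. taurus", "bos", "bos primigenius", "bos primigenius taurus"]),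
    (4530, ["osa", "asian rice", "oryza sativa", "o. sativa", "oryza", "rice"]),
    (4538, ["ogl", "african rice", "oryza glaberrima", "o. glaberrima"]),
    (3702, ["ath", "thale cress", "arabidopsis thaliana", "a. thaliana", "arabidopsis", "mouse-ear cress"]) ]

-- A's loop: result = 1; for each entry, if species is in the entry's list, set result to the id and break.
def speciesLoop (s : String) : List (Int × List String) → Int
  | [] => 1
  | (id, aliases) :: rest => if aliases.contains s then id else speciesLoop s rest

def get_species_id (species : String) : Int :=
  speciesLoop (PySem.Str.lower (PySem.Str.strip species)) speciesTable

-- ===== PORT B =====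
-- Source B's literal _ALIAS_ID dict, transcribed as an association list; one first-match lookup.
def aliasTable : List (String × Int) :=
  [ ("hsa", 9606),
    ("human", 9606),
    ("homo sapiens", 9606),
    ("h. sapiens", 9606),
    ("homo", 9606),
    ("mmu", 10090),
    ("mouse", 10090),
    ("mus musculus", 10090),
    ("m. musculus", 10090),
    ("mus", 10090),
    ("murine", 10090),
    ("rno", 10116),
    ("rat", 10116),
    ("rattus norvegicus", 10116),
    ("r. norvegicus", 10116),
    ("rattus", 10116),
    ("dme", 7227),
    ("fruitfly", 7227),
    ("drosophila melanogaster", 7227),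
    ("d. melanogaster", 7227),
    ("drosophila", 7227),
    ("gga", 9031),
    ("chicken", 9031),
    ("gallus gallus", 9031),
    ("g. gallus", 9031),
    ("gallus", 9031),
    ("chick", 9031),
    ("dre", 7955),
    ("zebrafish", 7955),
    ("danio rerio", 7955),
    ("d. rerio", 7955),
    ("danio", 7955),
    ("brachydanio rerio", 7955),
    ("cel", 6239),
    ("roundworm", 6239),
    ("caenorhabditis elegans", 6239),
    ("c. elegans", 6239),
    ("caenorhabditis", 6239),
    ("oar", 9940),
    ("sheep", 9940),
    ("ovis aries", 9940),
    ("o. aries", 9940),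
    ("ovis", 9940),
    ("ocu", 9986),
    ("rabbit", 9986),
    ("oryctolagos caniculus", 9986),
    ("o. caniculus", 9986),
    ("oryctolagos", 9986),
    ("bta", 9913),
    ("cattle", 9913),
    ("bos taurus", 9913),
    ("b. taurus", 9913),
    ("bos", 9913),
    ("bos primigenius", 9913),
    ("bos primigenius taurus", 9913),
    ("osa", 4530),
    ("asian rice", 4530),
    ("oryza sativa", 4530),
    ("o. sativa", 4530),
    ("oryza", 4530),
    ("rice", 4530),
    ("ogl", 4538),
    ("african rice", 4538),
    ("oryza glaberrima", 4538),
    ("o. glaberrima", 4538),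
    ("ath", 3702),
    ("thale cress", 3702),
    ("arabidopsis thaliana", 3702),
    ("a. thaliana", 3702),
    ("arabidopsis", 3702),
    ("mouse-ear cress", 3702) ]

def get_species_id_alt (species : String) : Int :=
  ((aliasTable.lookup (PySem.Str.lower (PySem.Str.strip species))).getD 1)

-- ===== PRECONDITION & SPEC =====
def Spec_get_species_id (species : String) (out : Int) : Prop := out = get_species_id_alt species
instance (species : String) (out : Int) : Decidable (Spec_get_species_id species out) := by unfold Spec_get_species_id; infer_instance

-- ===== CLAIM (what is proved, stated in full; the proofs are below) =====
def Claim_equal_get_species_id : Prop := ∀ (species : String), Dom_get_species_id species → Spec_get_species_id species (get_species_id species)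

-- ===== LEMMAS AND PROOFS =====

-- the flattening of A's nested table, to connect the two representations
def flatten (t : List (Int × List String)) : List (String × Int) :=
  t.flatMap (fun e => e.2.map (fun a => (a, e.1)))

theorem aliasTable_eq_flatten : aliasTable = flatten speciesTable := by decide

theorem lookup_map_pair (s : String) (id : Int) (aliases : List String) :
    (aliases.map (fun a => (a, id))).lookup s
      = (if s ∈ aliases then some id else none) := by
  induction aliases with
  | nil => simp
  | cons a as ih =>
    by_cases h : s = a
    · subst h; simp
    · have hba : (s == a) = false := by simp [h]
      simp [List.lookup_cons, hba, ih, h]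

theorem lookup_flatten_eq_loop (s : String) (t : List (Int × List String)) :
    ((flatten t).lookup s).getD 1 = speciesLoop s t := by
  induction t with
  | nil => simp [flatten, speciesLoop]
  | cons e rest ih =>
    simp only [flatten, List.flatMap_cons, List.lookup_append, lookup_map_pair] at *
    by_cases h : s ∈ e.2
    · cases e; simp [speciesLoop, h]
    · cases e with
      | mk id aliases =>
        simp only [h, if_neg, not_false_eq_true, Option.none_or]
        have hc : aliases.contains s = false := by simpa using h
        rw [ih]
        simp only [speciesLoop, hc, Bool.false_eq_true, if_false]

-- ===== VERDICT (by name: the statement is the Claim_ definition above) =====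
theorem get_species_id_spec : Claim_equal_get_species_id := by
  intro species _
  unfold Spec_get_species_id get_species_id get_species_id_alt
  rw [aliasTable_eq_flatten, lookup_flatten_eq_loop]
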